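-- pv_equiv track=rewrite | github.com/behzadhaki/GrooveTransformer | hvo_sequence/custom_dtypes.py | are_beat_division_factors_legal
-- ===== SOURCE A (Python) =====
-- def are_beat_division_factors_legal(beat_division_factors: list):
--     """beat_division_factors must integers and no two factors can be multiples of each other"""
--     assert isinstance(beat_division_factors, list), "beat_division_factors must be a list"
--     assert all([isinstance(x, int) for x in beat_division_factors]), "beat_division_factors must be a list of integers"
--     assert all([x > 0 for x in beat_division_factors]), "beat_division_factors must be a list of positive integers"
--
--     # check if any two factors are multiples of each other
--     for i in range(len(beat_division_factors)):
--         for j in range(i+1, len(beat_division_factors)):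
--             if beat_division_factors[i] % beat_division_factors[j] == 0 or \
--                     beat_division_factors[j] % beat_division_factors[i] == 0:
--                 return False
--     return True
-- ===== SOURCE B (Python) =====
-- def are_beat_division_factors_legal(beat_division_factors: list):
--     """beat_division_factors must integers and no two factors can be multiples of each other"""
--     assert isinstance(beat_division_factors, list), "beat_division_factors must be a list"
--     assert all([isinstance(x, int) for x in beat_division_factors]), "beat_division_factors must be a list of integers"
--     assert all([x > 0 for x in beat_division_factors]), "beat_division_factors must be a list of positive integers"
--
--     # a duplicate value divides itself
--     values = set(beat_division_factors)
--     if len(values) != len(beat_division_factors):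
--         return False
--     # enumerate the divisors of each value up to its square root;
--     # any proper divisor that is also in the list makes the list illegal
--     for v in values:
--         d = 1
--         while d * d <= v:
--             if v % d == 0:
--                 if (d != v and d in values) or (v // d != v and v // d in values):
--                     return False
--             d += 1
--     return True
-- ===== Notes on version B (the rewrite author's own statement) =====
-- stated objective: alternative
-- what changed: Replaced A's all-pairs nested divisibility loop by a set-based check: duplicates are detected by comparing len(set) with len(list), and each value's divisors are enumerated up to its square root and looked up in the set.
import Mathlib
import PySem

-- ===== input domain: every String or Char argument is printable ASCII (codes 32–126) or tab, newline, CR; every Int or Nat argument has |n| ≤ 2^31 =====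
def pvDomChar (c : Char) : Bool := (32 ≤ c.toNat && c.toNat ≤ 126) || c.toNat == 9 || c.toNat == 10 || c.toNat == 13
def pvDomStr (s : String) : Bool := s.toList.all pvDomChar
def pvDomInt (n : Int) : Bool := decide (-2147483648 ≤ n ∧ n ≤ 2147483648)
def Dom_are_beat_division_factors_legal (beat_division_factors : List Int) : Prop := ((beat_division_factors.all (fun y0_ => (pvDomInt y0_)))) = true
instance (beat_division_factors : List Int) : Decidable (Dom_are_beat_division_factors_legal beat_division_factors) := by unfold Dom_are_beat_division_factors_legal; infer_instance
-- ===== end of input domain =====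

-- B replaces A's all-pairs nested divisibility scan by a set-based check: a duplicate is detected
-- by comparing len(set) with len(list), and otherwise each value's divisors are enumerated up to
-- its square root and looked up in the set (objective: alternative decomposition, not speed).

-- ===== PORT A =====
-- the two type asserts always hold under the type convention; the positivity assert raises
-- outside Pre_ below; "for i: for j: if …: return False / return True" is the !any-any shape
def are_beat_division_factors_legal (beat_division_factors : List Int) : Bool :=
  !((PySem.List.pyRange 0 (beat_division_factors.length : Int) 1).any (fun i =>
      (PySem.List.pyRange (i + 1) (beat_division_factors.length : Int) 1).any (fun j =>
        PySem.Int.mod (PySem.List.pyGetD beat_division_factors i 0)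
            (PySem.List.pyGetD beat_division_factors j 0) == 0 ||
        PySem.Int.mod (PySem.List.pyGetD beat_division_factors j 0)
            (PySem.List.pyGetD beat_division_factors i 0) == 0)))

-- ===== PORT B =====
-- Source B's "while d * d <= v" loop; fuel bounds the iteration count (v.toNat + 1 suffices for v ≥ 1)
def altDivScan (values : PySem.Set Int) (v : Int) (d : Int) : Nat → Bool
  | 0 => false
  | fuel + 1 =>
    if d * d ≤ v then
      if PySem.Int.mod v d == 0 &&
         ((d != v && PySem.Set.contains values d) ||
          (PySem.Int.floordiv v d != v && PySem.Set.contains values (PySem.Int.floordiv v d))) then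
        true
      else altDivScan values v (d + 1) fuel
    else false

def are_beat_division_factors_legal_alt (beat_division_factors : List Int) : Bool :=
  let values := PySem.Set.ofList beat_division_factors
  if values.length ≠ beat_division_factors.length then false
  else !(values.any (fun v => altDivScan values v 1 (v.toNat + 1)))

-- ===== PRECONDITION & SPEC =====
-- Pre_: exactly the inputs A's third assert admits (all factors positive); on the rest A raises AssertionError
def Pre_are_beat_division_factors_legal (beat_division_factors : List Int) : Prop :=
  ∀ x ∈ beat_division_factors, 0 < x
instance (beat_division_factors : List Int) : Decidable (Pre_are_beat_division_factors_legal beat_division_factors) := by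
  unfold Pre_are_beat_division_factors_legal; infer_instance

def pvWitness_are_beat_division_factors_legal : List Int := [2, 3]

def Spec_are_beat_division_factors_legal (beat_division_factors : List Int) (out : Bool) : Prop := out = are_beat_division_factors_legal_alt beat_division_factors
instance (beat_division_factors : List Int) (out : Bool) : Decidable (Spec_are_beat_division_factors_legal beat_division_factors out) := by unfold Spec_are_beat_division_factors_legal; infer_instance

-- ===== CLAIM (what is proved, stated in full; the proofs are below) =====
def Claim_equal_are_beat_division_factors_legal : Prop := ∀ (beat_division_factors : List Int), Dom_are_beat_division_factors_legal beat_division_factors → Pre_are_beat_division_factors_legal beat_division_factors → Spec_are_beat_division_factors_legal beat_division_factors (are_beat_division_factors_legal beat_division_factors)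

-- ===== LEMMAS AND PROOFS =====

-- A's nested loop, characterized over indices
lemma portA_iff (l : List Int) :
    are_beat_division_factors_legal l = true ↔
      ∀ (i j : Nat) (hi : i < l.length) (hj : j < l.length), i < j →
        ¬(l[j] ∣ l[i] ∨ l[i] ∣ l[j]) := by
  simp only [are_beat_division_factors_legal, Bool.not_eq_true', List.any_eq_false, List.any_eq_true,
    PySem.List.mem_pyRange_one, not_exists, not_and,
    PySem.Int.mod_eq_zero_iff_dvd, Bool.or_eq_true, beq_iff_eq, not_or]
  constructor
  · intro h i j hi hj hij
    have := h (i : Int) ⟨by omega, by exact_mod_cast hi⟩ (j : Int)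
      ⟨by omega, by exact_mod_cast hj⟩
    rw [PySem.List.pyGetD_natCast, PySem.List.pyGetD_natCast] at this
    simp only [List.getD_eq_getElem l 0 hi, List.getD_eq_getElem l 0 hj] at this
    tauto
  · intro h i ⟨hi0, hin⟩ j ⟨hji, hjn⟩
    have hi' : i.toNat < l.length := by omega
    have hj' : j.toNat < l.length := by omega
    have := h i.toNat j.toNat hi' hj' (by omega)
    rw [PySem.List.pyGetD_of_nonneg _ _ (by omega : (0:Int) ≤ i),
      PySem.List.pyGetD_of_nonneg _ _ (by omega : (0:Int) ≤ j)]
    simp only [List.getD_eq_getElem l 0 hi', List.getD_eq_getElem l 0 hj']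
    tauto

-- the set-membership invariant of Source B's while loop
theorem altDivScan_iff (values : List Int) (v : Int) (fuel : Nat) :
    ∀ d : Int, 1 ≤ d → v < (d + (fuel : Int)) * (d + (fuel : Int)) →
    (altDivScan values v d fuel = true ↔
      ∃ e : Int, d ≤ e ∧ e * e ≤ v ∧ e ∣ v ∧
        ((e ≠ v ∧ e ∈ values) ∨ (PySem.Int.floordiv v e ≠ v ∧ PySem.Int.floordiv v e ∈ values))) := by
  induction fuel with
  | zero =>
    intro d hd hfuel
    simp only [altDivScan, Bool.false_eq_true, false_iff, not_exists]
    rintro e ⟨hde, hee, -⟩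
    push_cast at hfuel
    nlinarith
  | succ fuel ih =>
    intro d hd hfuel
    rw [altDivScan]
    split_ifs with h1 h2
    · -- found at d
      simp only [true_iff]
      refine ⟨d, le_refl d, h1, ?_, ?_⟩
      · rw [← PySem.Int.mod_eq_zero_iff_dvd]
        simpa using ((Bool.and_eq_true _ _).mp h2).1
      · have := ((Bool.and_eq_true _ _).mp h2).2
        simp only [Bool.or_eq_true, Bool.and_eq_true, bne_iff_ne, ne_eq,
          PySem.Set.contains_iff] at this
        tauto
    · -- recurse
      rw [ih (d + 1) (by omega) (by push_cast at hfuel ⊢; linarith)]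
      constructor
      · rintro ⟨e, hde, rest⟩; exact ⟨e, by omega, rest⟩
      · rintro ⟨e, hde, hee, hdvd, hmem⟩
        rcases eq_or_lt_of_le hde with heq | hlt
        · -- e = d : contradicts h2 being false
          exfalso
          subst heq
          apply h2
          simp only [Bool.and_eq_true, Bool.or_eq_true, bne_iff_ne, ne_eq,
            PySem.Set.contains_iff, beq_iff_eq]
          exact ⟨(PySem.Int.mod_eq_zero_iff_dvd v d).mpr hdvd, by tauto⟩
        · exact ⟨e, by omega, hee, hdvd, hmem⟩
    · -- d*d > v : nothing left
      simp only [false_iff, not_exists]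
      rintro e ⟨hde, hee, -⟩
      nlinarith

-- the loop started at d = 1 with fuel v.toNat + 1 finds exactly the proper positive divisors present
theorem altDivScan_one_iff (values : List Int) (v : Int) (hv : 1 ≤ v) :
    altDivScan values v 1 (v.toNat + 1) = true ↔
      ∃ q : Int, 1 ≤ q ∧ q ∣ v ∧ q ≠ v ∧ q ∈ values := by
  rw [altDivScan_iff values v (v.toNat + 1) 1 le_rfl (by push_cast; nlinarith [Int.toNat_of_nonneg (by omega : (0:Int) ≤ v)])]
  constructor
  · rintro ⟨e, h1e, hee, hdvd, hmem⟩
    have he0 : 0 < e := by omega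
    have hev : e ≤ v := by nlinarith
    rcases hmem with ⟨hne, hm⟩ | ⟨hne, hm⟩
    · exact ⟨e, h1e, hdvd, hne, hm⟩
    · refine ⟨PySem.Int.floordiv v e, ?_, ?_, hne, hm⟩
      · rw [PySem.Int.floordiv_eq_ediv_of_pos he0]
        rw [Int.le_ediv_iff_mul_le he0]; nlinarith
      · rw [PySem.Int.floordiv_eq_ediv_of_pos he0]
        exact Int.ediv_dvd_of_dvd hdvd
  · rintro ⟨q, h1q, hdvd, hne, hm⟩
    have hq0 : 0 < q := by omega
    have hqv : q ≤ v := Int.le_of_dvd (by omega) hdvd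
    by_cases hsq : q * q ≤ v
    · exact ⟨q, h1q, hsq, hdvd, Or.inl ⟨hne, hm⟩⟩
    · obtain ⟨c, hc⟩ := hdvd
      have hc0 : 0 < c := by nlinarith
      have hcq : c < q := by nlinarith
      refine ⟨c, by omega, by nlinarith, ⟨q, by linarith [hc]⟩, Or.inr ?_⟩
      have : PySem.Int.floordiv v c = q := by
        rw [PySem.Int.floordiv_eq_ediv_of_pos hc0, hc, mul_comm q c,
          Int.mul_ediv_cancel_left _ (by omega)]
      rw [this]
      exact ⟨hne, hm⟩

-- set(xs) keeps a sub-sequence of xs (first occurrences)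
theorem oflist_sub (l : List Int) : (PySem.Set.ofList l).Sublist l := by
  induction l with
  | nil => simp [PySem.Set.ofList]
  | cons x xs ih =>
    rw [PySem.Set.ofList_cons]
    refine List.Sublist.cons₂ x (List.Sublist.trans ?_ ih)
    exact List.filter_sublist

-- len(set(xs)) == len(xs) detects exactly the duplicate-free lists
theorem oflist_len_iff (l : List Int) :
    (PySem.Set.ofList l).length = l.length ↔ l.Nodup := by
  constructor
  · intro h
    have := (oflist_sub l).eq_of_length h
    rw [← this]; exact PySem.Set.nodup_ofList l
  · intro h; rw [PySem.Set.ofList_eq_self_of_nodup l h]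

def B (l : List Int) : Bool :=
  let values := PySem.Set.ofList l
  if values.length ≠ l.length then false
  else !(values.any (fun v => altDivScan values v 1 (v.toNat + 1)))

-- B, characterized
theorem portB_iff (l : List Int) (hp : ∀ x ∈ l, 0 < x) :
    are_beat_division_factors_legal_alt l = true ↔ l.Nodup ∧ ∀ v ∈ l, ∀ q ∈ l, q ∣ v → q = v := by
  by_cases hn : l.Nodup
  · have heq : PySem.Set.ofList l = l := PySem.Set.ofList_eq_self_of_nodup l hn
    simp only [are_beat_division_factors_legal_alt, heq, ne_eq, not_true_eq_false, if_false,
      Bool.not_eq_true', List.any_eq_false]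
    constructor
    · intro h
      refine ⟨hn, fun v hv q hq hdvd => ?_⟩
      by_contra hne
      exact (h v hv) ((altDivScan_one_iff l v (hp v hv)).mpr ⟨q, hp q hq, hdvd, hne, hq⟩)
    · rintro ⟨-, h⟩ v hv hs
      obtain ⟨q, h1q, hdvd, hne, hm⟩ := (altDivScan_one_iff l v (hp v hv)).mp hs
      exact hne (h v hv q hm hdvd)
  · have : (PySem.Set.ofList l).length ≠ l.length := fun h => hn ((oflist_len_iff l).mp h)
    simp only [are_beat_division_factors_legal_alt, if_pos this, Bool.false_eq_true, false_iff, not_and]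
    intro h; exact absurd h hn

-- the two characterizations agree (no positivity needed here)
theorem bridge (l : List Int) :
    (∀ (i j : Nat) (hi : i < l.length) (hj : j < l.length), i < j →
        ¬(l[j] ∣ l[i] ∨ l[i] ∣ l[j])) ↔
      (l.Nodup ∧ ∀ v ∈ l, ∀ q ∈ l, q ∣ v → q = v) := by
  constructor
  · intro h
    constructor
    · show l.Pairwise (· ≠ ·)
      rw [List.pairwise_iff_getElem]
      intro i j hi hj hij heq
      exact h i j hi hj hij (Or.inl (heq ▸ dvd_refl _))
    · intro v hv q hq hdvd
      by_contra hne
      obtain ⟨i, hi, hvi⟩ := List.mem_iff_getElem.mp hv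
      obtain ⟨j, hj, hqj⟩ := List.mem_iff_getElem.mp hq
      have hij : i ≠ j := by intro e; subst e; exact hne (by rw [← hvi, ← hqj])
      rcases lt_or_gt_of_ne hij with hlt | hlt
      · exact h i j hi hj hlt (Or.inl (by rw [hvi, hqj]; exact hdvd))
      · exact h j i hj hi hlt (Or.inr (by rw [hvi, hqj]; exact hdvd))
  · rintro ⟨hnd, hdiv⟩ i j hi hj hij hor
    have hne : l[i] ≠ l[j] := (List.pairwise_iff_getElem.mp hnd) i j hi hj hij
    rcases hor with hd | hd
    · exact hne (hdiv l[i] (l.getElem_mem hi) l[j] (l.getElem_mem hj) hd).symm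
    · exact hne (hdiv l[j] (l.getElem_mem hj) l[i] (l.getElem_mem hi) hd)

-- ===== VERDICT (by name: the statement is the Claim_ definition above) =====
theorem are_beat_division_factors_legal_spec : Claim_equal_are_beat_division_factors_legal := by
  intro l _ hp
  unfold Spec_are_beat_division_factors_legal
  have hiff : are_beat_division_factors_legal l = true ↔
      are_beat_division_factors_legal_alt l = true := by
    rw [portA_iff l, portB_iff l hp]
    exact bridge l
  cases hA : are_beat_division_factors_legal l with
  | true => exact (hiff.mp hA).symm
  | false =>
    cases hB : are_beat_division_factors_legal_alt l with
    | false => rfl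
    | true => exact absurd (hA ▸ hiff.mpr hB) (by simp)
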